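-- pv_equiv track=rewrite | github.com/sskatee/lab_7 | 1.py | adjacency_to_materialized
-- ===== SOURCE A (Python) =====
-- def adjacency_to_materialized(adjacency_list):
--     tree = {}
--     children = set()
--
--     for parent, child in adjacency_list:
--         tree.setdefault(parent, []).append(child)
--         children.add(child)
--
--     root = None
--     for parent in tree:
--         if parent not in children:
--             root = parent
--             break
--
--     result = []
--
--     def dfs(node, path):
--         result.append([node, path])
--         for child in tree.get(node, []):
--             dfs(child, path + "/" + child)
--
--     dfs(root, root)
--     return result
-- ===== SOURCE B (Python) =====
-- def adjacency_to_materialized(adjacency_list):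
--     tree = {}
--     children = set()
--
--     for parent, child in adjacency_list:
--         tree.setdefault(parent, []).append(child)
--         children.add(child)
--
--     root = None
--     for parent in tree:
--         if parent not in children:
--             root = parent
--             break
--
--     result = []
--     stack = [(root, root)]
--     while stack:
--         node, path = stack.pop()
--         result.append([node, path])
--         for child in reversed(tree.get(node, [])):
--             stack.append((child, path + "/" + child))
--     return result
-- ===== Notes on version B (the rewrite author's own statement) =====
-- stated objective: alternative
-- what changed: The recursive dfs (with a closure appending to a shared result list) is replaced by an iterative explicit-stack loop that pops (node, path) pairs and pushes children in reverse so pre-order is preserved; the adjacency-map build and root search are unchanged.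
-- outside the precondition, e.g. on adjacency_to_materialized([]): A returns [[None, None]], B returns [[None, None]]; on adjacency_to_materialized([('a', 'b'), ('b', 'a')]): A returns [[None, None]], B returns [[None, None]]
import Mathlib
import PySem

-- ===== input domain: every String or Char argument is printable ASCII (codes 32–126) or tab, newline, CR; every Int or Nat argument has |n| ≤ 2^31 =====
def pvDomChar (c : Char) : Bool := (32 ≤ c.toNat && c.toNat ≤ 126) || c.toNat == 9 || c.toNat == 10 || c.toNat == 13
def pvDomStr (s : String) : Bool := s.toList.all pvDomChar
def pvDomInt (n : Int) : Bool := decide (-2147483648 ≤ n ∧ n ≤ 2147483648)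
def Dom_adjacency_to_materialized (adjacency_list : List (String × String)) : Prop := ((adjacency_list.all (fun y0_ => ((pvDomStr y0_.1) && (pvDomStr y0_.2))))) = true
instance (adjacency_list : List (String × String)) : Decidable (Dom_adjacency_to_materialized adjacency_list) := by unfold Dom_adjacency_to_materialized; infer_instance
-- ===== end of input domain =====

-- B replaces A's recursive dfs by an explicit stack loop (same adjacency-map build and
-- root search, which both Pythons share); objective: alternative decomposition, same cost.

-- ===== SHARED HELPERS (the first half of BOTH Pythons is the identical build/root-search code) =====
-- tree.setdefault(parent, []).append(child) over the list
def pvBuildTree (l : List (String × String)) : PySem.Dict String (List String) :=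
  l.foldl (fun d pc => d.modify pc.1 [] (fun cs => cs ++ [pc.2])) PySem.Dict.empty

-- children.add(child) over the list
def pvChildren (l : List (String × String)) : PySem.Set String :=
  l.foldl (fun s pc => PySem.Set.add s pc.2) PySem.Set.empty

-- 'for parent in tree: if parent not in children: root = parent; break'
def pvRoot (l : List (String × String)) : Option String :=
  (pvBuildTree l).keys.find? (fun p => !(PySem.Set.contains (pvChildren l) p))

-- ===== PORT A =====
-- A's recursive dfs; the Nat argument is ONLY a totality fuel (depth bound): under
-- Pre_ the depth never exceeds adjacency_list.length + 1, so the 0 branch is never hit.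
def pvDfs (tree : PySem.Dict String (List String)) : Nat → String → String → List (List String)
  | 0, _, _ => []
  | d+1, node, path =>
      (tree.getD node []).foldl (fun acc c => acc ++ pvDfs tree d c (path ++ "/" ++ c)) [[node, path]]

-- dfs(root, root); on root = None Python A's result [[None, None]] is not a List String
-- (outside Pre_), the port returns [] there.
def adjacency_to_materialized (adjacency_list : List (String × String)) : List (List String) :=
  match pvRoot adjacency_list with
  | none => []
  | some r => pvDfs (pvBuildTree adjacency_list) (adjacency_list.length + 1) r r

-- ===== PORT B =====
-- the length of any single child list is bounded by the total size of the dict's values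
-- (needed by pvRunStack's termination measure)
theorem pvGetD_len_le (tree : PySem.Dict String (List String)) (n : String) :
    (tree.getD n []).length ≤ (tree.values.map List.length).sum := by
  rw [PySem.Dict.getD_eq_get?_getD]
  cases h : tree.get? n with
  | none => simp
  | some v =>
      have hv : v ∈ tree.values := by
        have := PySem.Dict.mem_items_of_get?_eq_some tree h
        simp only [PySem.Dict.values]
        exact List.mem_map_of_mem this
      simpa using List.single_le_sum (by simp) _ (List.mem_map_of_mem hv)

-- B's 'while stack: node, path = stack.pop(); …' loop. The Lean list is the Python stack
-- REVERSED (head = top), so Source B's push of reversed(children) followed by pop-from-the-end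
-- is prepending the children in order; the Nat in each entry is only the totality fuel.
def pvRunStack (tree : PySem.Dict String (List String)) :
    List (String × String × Nat) → List (List String) → List (List String)
  | [], res => res
  | (_, _, 0) :: rest, res => pvRunStack tree rest res
  | (n, p, d+1) :: rest, res =>
      pvRunStack tree (((tree.getD n []).map (fun c => (c, p ++ "/" ++ c, d))) ++ rest)
        (res ++ [[n, p]])
  termination_by stack _ => (stack.map (fun e => ((tree.values.map List.length).sum + 2) ^ e.2.2)).sum
  decreasing_by
  · simp only [List.map_cons, List.sum_cons, pow_zero]
    omega
  · simp only [List.map_cons, List.sum_cons, List.map_append, List.sum_append, List.map_map]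
    have hlen := pvGetD_len_le tree n
    set K := (tree.values.map List.length).sum + 2
    have h1 : ∀ (cs : List String),
        (cs.map ((fun (e : String × String × Nat) => K ^ e.2.2) ∘ (fun c => (c, p ++ "/" ++ c, d)))).sum
          = cs.length * K ^ d := by
      intro cs
      induction cs with
      | nil => simp
      | cons x xs ih => simp [ih, Nat.succ_mul, Nat.add_comm]
    rw [h1]
    have h2 : (tree.getD n []).length * K ^ d < K ^ (d + 1) := by
      calc (tree.getD n []).length * K ^ d < K * K ^ d :=
              Nat.mul_lt_mul_of_lt_of_le (by omega) (le_refl _) (Nat.pow_pos (by omega))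
        _ = K ^ (d + 1) := by ring
    simp only [Nat.succ_eq_add_one]
    omega

def adjacency_to_materialized_alt (adjacency_list : List (String × String)) : List (List String) :=
  match pvRoot adjacency_list with
  | none => []
  | some r =>
      pvRunStack (pvBuildTree adjacency_list) [(r, r, adjacency_list.length + 1)] []

-- ===== PRECONDITION & SPEC =====
-- successors of a node and bounded reachability closure, used only to state Pre_
def pvSuccs (l : List (String × String)) (x : String) : List String :=
  (l.filter (fun e => e.1 == x)).map (·.2)

def pvReach (l : List (String × String)) : Nat → PySem.Set String → PySem.Set String
  | 0, s => s
  | k+1, s => pvReach l k (PySem.Set.update s (s.flatMap (pvSuccs l)))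

-- the root A's scan picks: first parent (in first-occurrence order) that is never a child
def pvRootSpec (l : List (String × String)) : Option String :=
  (PySem.List.dedup (l.map (·.1))).find? (fun p => !((l.map (·.2)).contains p))

-- Pre_ excludes (a) inputs with no root (some parent outside the child set): there Python A
-- returns [[None, None]], which is not a list of strings; and (b) inputs with a cycle
-- reachable from the root, on which Python A raises RecursionError (and B loops).
def Pre_adjacency_to_materialized (adjacency_list : List (String × String)) : Prop :=
  (pvRootSpec adjacency_list).isSome = true ∧
  ∀ n ∈ pvReach adjacency_list (2 * adjacency_list.length + 2) (pvRootSpec adjacency_list).toList,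
    n ∉ pvReach adjacency_list (2 * adjacency_list.length + 2)
        (PySem.Set.ofList (pvSuccs adjacency_list n))

instance (adjacency_list : List (String × String)) : Decidable (Pre_adjacency_to_materialized adjacency_list) := by
  unfold Pre_adjacency_to_materialized; infer_instance

def pvWitness_adjacency_to_materialized : (List (String × String)) := [("a", "b")]

def Spec_adjacency_to_materialized (adjacency_list : List (String × String)) (out : List (List String)) : Prop := out = adjacency_to_materialized_alt adjacency_list
instance (adjacency_list : List (String × String)) (out : List (List String)) : Decidable (Spec_adjacency_to_materialized adjacency_list out) := by unfold Spec_adjacency_to_materialized; infer_instance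

-- ===== CLAIM (what is proved, stated in full; the proofs are below) =====
def Claim_equal_adjacency_to_materialized : Prop := ∀ (adjacency_list : List (String × String)), Dom_adjacency_to_materialized adjacency_list → Pre_adjacency_to_materialized adjacency_list → Spec_adjacency_to_materialized adjacency_list (adjacency_to_materialized adjacency_list)

-- ===== LEMMAS AND PROOFS =====

-- one dfs level is [node,path] followed by the concatenation of the children's subtrees
theorem pvDfs_succ (tree : PySem.Dict String (List String)) (d : Nat) (node path : String) :
    pvDfs tree (d+1) node path
      = [[node, path]] ++ (tree.getD node []).flatMap (fun c => pvDfs tree d c (path ++ "/" ++ c)) := by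
  rw [pvDfs]
  exact PySem.List.foldl_append_eq_flatMap _ _ _

-- popping a block of same-fuel entries runs dfs on each of them in order
theorem pvRunStack_block (tree : PySem.Dict String (List String)) (d : Nat) :
    ∀ (es : List (String × String)) (rest : List (String × String × Nat)) (res : List (List String)),
      pvRunStack tree (es.map (fun e => (e.1, e.2, d)) ++ rest) res
        = pvRunStack tree rest (res ++ es.flatMap (fun e => pvDfs tree d e.1 e.2)) := by
  induction d with
  | zero =>
      intro es
      induction es with
      | nil => intro rest res; simp
      | cons e es' ih =>
          intro rest res
          simp only [List.map_cons, List.cons_append]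
          rw [pvRunStack, ih]
          simp [pvDfs]
  | succ d ihd =>
      intro es
      induction es with
      | nil => intro rest res; simp
      | cons e es' ih =>
          intro rest res
          simp only [List.map_cons, List.cons_append]
          rw [pvRunStack]
          have hmap : ((tree.getD e.1 []).map (fun c => (c, e.2 ++ "/" ++ c, d)))
              = ((tree.getD e.1 []).map (fun c => (c, e.2 ++ "/" ++ c))).map (fun e => (e.1, e.2, d)) := by
            simp [List.map_map]
          rw [hmap, ihd, ih]
          simp [pvDfs_succ, List.flatMap_cons, List.flatMap_map, List.append_assoc]

-- ===== VERDICT (by name: the statement is the Claim_ definition above) =====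
theorem adjacency_to_materialized_spec : Claim_equal_adjacency_to_materialized := by
  intro l _ _
  unfold Spec_adjacency_to_materialized adjacency_to_materialized adjacency_to_materialized_alt
  cases h : pvRoot l with
  | none => rfl
  | some r =>
      have hb := pvRunStack_block (pvBuildTree l) (l.length + 1) [(r, r)] [] []
      simp only [List.map_cons, List.map_nil, List.nil_append,
        List.flatMap_cons, List.flatMap_nil, List.append_nil] at hb
      show pvDfs (pvBuildTree l) (l.length + 1) r r
        = pvRunStack (pvBuildTree l) [(r, r, l.length + 1)] []
      rw [hb, pvRunStack]
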